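-- pv_equiv track=rewrite | github.com/MiguelBarrazaAr/audiogame-test-framework | ikuEngine/utiles/cardinal.py | calcularDistancia
-- ===== SOURCE A (Python) =====
-- from enum import IntEnum
--
-- class Cardinal(IntEnum):
--   norte=0
--   noreste=1
--   este=2
--   sureste=3
--   sur=4
--   suroeste=5
--   oeste=6
--   noroeste=7
--
-- def destino(p1, p2):
--   """ dado 2 puntos determina hacia que destino se encuentra el segundo tomando como origen el primero. """
--   x1, y1 = p1
--   x2, y2 = p2
--   if x1 == x2 and y1 < y2:
--     return Cardinal.norte
--   elif x1 == x2 and y1 > y2: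
--     return Cardinal.sur
--   elif x1 < x2 and y1 == y2:
--     return Cardinal.este
--   elif x1 > x2 and y1 == y2:
--     return Cardinal.oeste
--   elif x1 < x2 and y1 < y2:
--     return Cardinal.noreste
--   elif x1 > x2 and y1 < y2:
--     return Cardinal.noroeste
--   elif x1 < x2 and y1 > y2:
--     return Cardinal.sureste
--   elif x1 > x2 and y1 > y2:
--     return Cardinal.suroeste
--   else:
--     raise ValueError("los puntos son iguales.")
--
-- def descomponer(c):
--   """ dado un cardinal compuesto lo descompone en simples. """
--   if c is Cardinal.noreste:
--     return (Cardinal.este, Cardinal.norte)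
--   elif c is Cardinal.sureste:
--     return (Cardinal.este, Cardinal.sur)
--   elif c is Cardinal.suroeste:
--     return (Cardinal.oeste, Cardinal.sur)
--   elif c is Cardinal.noroeste:
--     return (Cardinal.oeste, Cardinal.norte)
--   else:
--     raise ValueError("'{}' No es un cardinal compuesto.".format(c))
--
-- def calcularDistancia(p1, p2, distancia):
--   """ dado 2 puntos, retorna una lista de tuplas (pasos, destino) que ejemplifica la distancia entre esos 2 puntos.
--   """
--   p = tuple(abs(a-b) for a,b in zip(p1, p2))
--   if any(x>distancia for x in (p)):
--     raise ValueError("los puntos estan muy distantes.")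
--   else:
--     d = destino(p1,p2)
--     try:
--       ds = descomponer(d)
--     except ValueError:
--       return [(sum(p), d.name)]
--     else:
--       return [(p[0], ds[0].name), (p[1], ds[1].name)]
-- ===== SOURCE B (Python) =====
-- def calcularDistancia(p1, p2, distancia):
--   """ dado 2 puntos, retorna una lista de tuplas (pasos, destino) que ejemplifica la distancia entre esos 2 puntos. """
--   x1, y1 = p1
--   x2, y2 = p2
--   dx = x2 - x1
--   dy = y2 - y1
--   if abs(dx) > distancia or abs(dy) > distancia:
--     raise ValueError("los puntos estan muy distantes.")
--   if dx == 0 and dy == 0: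
--     raise ValueError("los puntos son iguales.")
--   ew = (abs(dx), 'este' if dx > 0 else 'oeste')
--   ns = (abs(dy), 'norte' if dy > 0 else 'sur')
--   if dy == 0:
--     return [ew]
--   if dx == 0:
--     return [ns]
--   return [ew, ns]
-- ===== Notes on version B (the rewrite author's own statement) =====
-- stated objective: simpler
-- what changed: Replaces the 8-way direction classification (destino) plus 4-way decomposition (descomponer) with a direct axis-wise computation of dx/dy and their step tuples.
import Mathlib
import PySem

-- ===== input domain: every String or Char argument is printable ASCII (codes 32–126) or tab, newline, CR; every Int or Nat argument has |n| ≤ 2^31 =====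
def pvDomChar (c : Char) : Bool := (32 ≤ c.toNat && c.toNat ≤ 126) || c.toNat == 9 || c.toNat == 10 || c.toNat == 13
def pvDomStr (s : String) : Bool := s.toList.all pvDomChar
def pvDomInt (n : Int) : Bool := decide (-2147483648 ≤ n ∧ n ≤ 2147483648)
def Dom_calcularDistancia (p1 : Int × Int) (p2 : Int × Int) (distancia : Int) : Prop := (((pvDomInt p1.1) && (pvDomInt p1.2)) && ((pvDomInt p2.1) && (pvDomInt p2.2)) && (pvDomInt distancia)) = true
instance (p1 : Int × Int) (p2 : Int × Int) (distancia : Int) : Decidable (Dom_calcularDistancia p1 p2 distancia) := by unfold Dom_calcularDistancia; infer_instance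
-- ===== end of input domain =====

-- B replaces A's 8-way classify (destino) + 4-way decompose (descomponer) round-trip with a
-- direct axis-wise computation (objective: simpler). Both programs raise ValueError on
-- too-distant or equal points; Pre_ excludes exactly those inputs.

-- ===== PORT A =====
inductive PvCardinal
  | norte | noreste | este | sureste | sur | suroeste | oeste | noroeste
deriving DecidableEq, Repr

def pvCardinalName (c : PvCardinal) : String :=
  match c with
  | .norte => "norte" | .noreste => "noreste" | .este => "este" | .sureste => "sureste"
  | .sur => "sur" | .suroeste => "suroeste" | .oeste => "oeste" | .noroeste => "noroeste"

-- destino: none = raise ValueError("los puntos son iguales.")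
def pvDestino (p1 p2 : Int × Int) : Option PvCardinal :=
  let x1 := p1.1; let y1 := p1.2; let x2 := p2.1; let y2 := p2.2
  if x1 = x2 ∧ y1 < y2 then some .norte
  else if x1 = x2 ∧ y1 > y2 then some .sur
  else if x1 < x2 ∧ y1 = y2 then some .este
  else if x1 > x2 ∧ y1 = y2 then some .oeste
  else if x1 < x2 ∧ y1 < y2 then some .noreste
  else if x1 > x2 ∧ y1 < y2 then some .noroeste
  else if x1 < x2 ∧ y1 > y2 then some .sureste
  else if x1 > x2 ∧ y1 > y2 then some .suroeste
  else none

-- descomponer: none = raise ValueError (not a compound cardinal)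
def pvDescomponer (c : PvCardinal) : Option (PvCardinal × PvCardinal) :=
  match c with
  | .noreste => some (.este, .norte)
  | .sureste => some (.este, .sur)
  | .suroeste => some (.oeste, .sur)
  | .noroeste => some (.oeste, .norte)
  | _ => none

-- raise branches (excluded by Pre_) return []
def calcularDistancia (p1 : Int × Int) (p2 : Int × Int) (distancia : Int) : List (Int × String) :=
  let p : Int × Int := (|p1.1 - p2.1|, |p1.2 - p2.2|)
  if p.1 > distancia ∨ p.2 > distancia then []
  else
    match pvDestino p1 p2 with
    | none => []
    | some d =>
      match pvDescomponer d with
      | none => [(p.1 + p.2, pvCardinalName d)]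
      | some ds => [(p.1, pvCardinalName ds.1), (p.2, pvCardinalName ds.2)]

-- ===== PORT B =====
-- raise branches (excluded by Pre_) return []
def calcularDistancia_alt (p1 : Int × Int) (p2 : Int × Int) (distancia : Int) : List (Int × String) :=
  let dx := p2.1 - p1.1
  let dy := p2.2 - p1.2
  if |dx| > distancia ∨ |dy| > distancia then []
  else if dx = 0 ∧ dy = 0 then []
  else
    let ew : Int × String := (|dx|, if dx > 0 then "este" else "oeste")
    let ns : Int × String := (|dy|, if dy > 0 then "norte" else "sur")
    if dy = 0 then [ew]
    else if dx = 0 then [ns]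
    else [ew, ns]

-- ===== PRECONDITION & SPEC =====
-- Pre_ excludes exactly the inputs where A raises ValueError: a coordinate gap larger than
-- distancia ("los puntos estan muy distantes.") or equal points ("los puntos son iguales.").
def Pre_calcularDistancia (p1 : Int × Int) (p2 : Int × Int) (distancia : Int) : Prop :=
  |p1.1 - p2.1| ≤ distancia ∧ |p1.2 - p2.2| ≤ distancia ∧ ¬(p1.1 = p2.1 ∧ p1.2 = p2.2)
instance (p1 : Int × Int) (p2 : Int × Int) (distancia : Int) : Decidable (Pre_calcularDistancia p1 p2 distancia) := by unfold Pre_calcularDistancia; infer_instance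

def pvWitness_calcularDistancia : (Int × Int) × (Int × Int) × Int := ((0, 0), (2, 3), 5)

def Spec_calcularDistancia (p1 : Int × Int) (p2 : Int × Int) (distancia : Int) (out : List (Int × String)) : Prop := out = calcularDistancia_alt p1 p2 distancia
instance (p1 : Int × Int) (p2 : Int × Int) (distancia : Int) (out : List (Int × String)) : Decidable (Spec_calcularDistancia p1 p2 distancia out) := by unfold Spec_calcularDistancia; infer_instance

-- ===== CLAIM (what is proved, stated in full; the proofs are below) =====
def Claim_equal_calcularDistancia : Prop := ∀ (p1 : Int × Int) (p2 : Int × Int) (distancia : Int), Dom_calcularDistancia p1 p2 distancia → Pre_calcularDistancia p1 p2 distancia → Spec_calcularDistancia p1 p2 distancia (calcularDistancia p1 p2 distancia)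

-- ===== LEMMAS AND PROOFS =====

-- ===== VERDICT (by name: the statement is the Claim_ definition above) =====
set_option maxHeartbeats 2000000 in
theorem calcularDistancia_spec : Claim_equal_calcularDistancia := by
  intro ⟨x1, y1⟩ ⟨x2, y2⟩ d _ hpre
  obtain ⟨h1, h2, h3⟩ := hpre
  simp only [Spec_calcularDistancia, calcularDistancia, calcularDistancia_alt,
    pvDestino, pvDescomponer, pvCardinalName] at *
  rcases lt_trichotomy x1 x2 with hx | hx | hx <;>
    rcases lt_trichotomy y1 y2 with hy | hy | hy <;>
    simp_all <;>
    simp only [abs_sub_comm x1 x2, abs_sub_comm y1 y2] <;>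
    split_ifs <;> simp_all <;> omega
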